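-- pv_equiv track=rewrite | github.com/AlwaysRYU/CodingTEST_Python | 2021.7월/06.무지의 먹방라이브.py | solution
-- ===== SOURCE A (Python) =====
-- def solution(times, k):
--     eat = 0
--     Number = len(times)
--     while True :
--         if eat == Number :
--             eat = 0
--         if times[eat] != 0 :
--             if k == 0 :
--                 if eat == Number :
--                     return 1
--                 else :
--                     return eat + 1
--             times[eat] -= 1
--             eat += 1
--             k -= 1
--             continue
--         else :
--             eat += 1
--             continue
-- ===== SOURCE B (Python) =====
-- def solution(times, k):
--     # Batched simulation: each "round" eats every food with a nonzero remaining
--     # time once, in index order.  Instead of stepping one bite at a time like A,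
--     # jump m = min(positive remaining times) whole rounds at once; within a block
--     # of identical rounds the k-th bite sits at active[k % len(active)].
--     # (Unlike A, this does not mutate `times`; equivalence is about the return value.)
--     active = [i for i, t in enumerate(times) if t != 0]
--     pos = [t for t in times if t > 0]
--     if pos:
--         m = min(pos)
--         if k >= m * len(active):
--             return solution([t - m if t != 0 else 0 for t in times], k - m * len(active))
--     return active[k % len(active)] + 1
-- ===== Notes on version B (the rewrite author's own statement) =====
-- stated objective: alternative
-- what changed: A simulates eating one bite per loop iteration over a mutated list; B jumps min(positive remaining time) whole rounds at once per recursion step and locates the final bite by modular arithmetic over the active indices.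
import Mathlib
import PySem

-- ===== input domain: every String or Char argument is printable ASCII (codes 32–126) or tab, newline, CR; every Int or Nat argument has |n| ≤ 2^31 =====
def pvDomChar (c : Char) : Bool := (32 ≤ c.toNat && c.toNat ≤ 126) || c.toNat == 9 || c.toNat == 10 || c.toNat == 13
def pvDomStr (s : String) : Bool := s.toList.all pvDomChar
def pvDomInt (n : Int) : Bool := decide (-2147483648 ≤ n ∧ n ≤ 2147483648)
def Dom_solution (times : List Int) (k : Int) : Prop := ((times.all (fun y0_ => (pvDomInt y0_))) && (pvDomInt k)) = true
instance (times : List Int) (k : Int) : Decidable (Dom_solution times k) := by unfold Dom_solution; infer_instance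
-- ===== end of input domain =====

-- B replaces A's one-bite-at-a-time simulation by batched rounds: it jumps min(positive remaining)
-- whole rounds at once and locates the final bite by modular arithmetic. A mutates `times` in
-- place and B does not; the equivalence proved here is about the return value only.

-- ===== PORT A =====
-- A's 'while True' loop; fuel only totalizes it ('none' = not returned yet): A diverges or raises
-- IndexError exactly on the inputs Pre_solution excludes, and the fuel chosen in `solution` below
-- is proved sufficient on Pre_solution (lemma pvMain below)
def pvLoopA (times : List Int) (number : Int) (eat k : Int) : Nat → Option Int
  | 0 => none
  | fuel + 1 =>
    let eat := if eat = number then 0 else eat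
    match PySem.List.pyGet? times eat with
    | none => none            -- IndexError (empty list)
    | some t =>
      if t ≠ 0 then
        if k = 0 then
          if eat = number then some 1 else some (eat + 1)
        else pvLoopA (PySem.List.pySetD times eat (t - 1)) number (eat + 1) (k - 1) fuel
      else pvLoopA times number (eat + 1) k fuel

def solution (times : List Int) (k : Int) : Int :=
  (pvLoopA times (times.length : Int) 0 k (k.toNat * times.length + times.length + 1)).getD 0

-- ===== PORT B =====
-- general strict countP comparison, used only by the termination lemma below
theorem pvCountP_lt {α : Type} (p q : α → Bool) (l : List α) (hx : ∀ x ∈ l, p x → q x)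
    (x : α) (hm : x ∈ l) (hq : q x) (hp : ¬ p x) : l.countP p < l.countP q := by
  induction l with
  | nil => simp at hm
  | cons a tl ih =>
    rcases List.mem_cons.1 hm with rfl | hmt
    · have h1 : tl.countP p ≤ tl.countP q :=
        List.countP_mono_left (fun y hy => hx y (List.mem_cons_of_mem _ hy))
      simp [hq, hp]
      omega
    · have h1 := ih (fun y hy => hx y (List.mem_cons_of_mem _ hy)) hmt
      simp only [List.countP_cons]
      have : (if p a = true then 1 else 0) ≤ (if q a = true then 1 else 0) := by
        by_cases h : p a = true
        · simp [h, hx a (List.mem_cons_self) h]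
        · simp [h]
      omega

-- termination lemma for B's recursion (cited in decreasing_by): subtracting the minimal positive
-- remaining time zeroes at least one positive entry
theorem pvPosCount_lt (ts : List Int) (m : Int)
    (hmem : m ∈ ts.filter (fun t => 0 < t)) :
    ((ts.map (fun t => if t ≠ 0 then t - m else 0)).filter (fun t => 0 < t)).length
      < (ts.filter (fun t => 0 < t)).length := by
  rw [List.mem_filter] at hmem
  obtain ⟨hm, hm0⟩ := hmem
  have hm0 : (0:Int) < m := by simpa using hm0
  simp only [← List.countP_eq_length_filter, List.countP_map]
  apply pvCountP_lt _ _ ts _ m hm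
  · simpa using hm0
  · simp [Function.comp, hm0.ne']
  · intro x hx hpx
    simp only [Function.comp] at hpx
    by_cases hz : x = 0
    · simp [hz] at hpx
    · simp [hz] at hpx ⊢
      omega

def solution_alt (times : List Int) (k : Int) : Int :=
  let active := ((PySem.List.enumerate times).filter (fun p => p.2 ≠ 0)).map (fun p => p.1)
  let pos := times.filter (fun t => 0 < t)
  match h : PySem.List.min? pos (fun t => t) with
  | some m =>
    if k ≥ m * (active.length : Int) then
      solution_alt (times.map (fun t => if t ≠ 0 then t - m else 0)) (k - m * (active.length : Int))
    else
      PySem.List.pyGetD active (PySem.Int.mod k (active.length : Int)) 0 + 1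
  | none => PySem.List.pyGetD active (PySem.Int.mod k (active.length : Int)) 0 + 1
termination_by (times.filter (fun t => 0 < t)).length
decreasing_by
  simp only [pos, List.unattach_filter, List.unattach_attach] at h
  simp only [List.map_attach_eq_pmap, List.pmap_eq_map]
  exact pvPosCount_lt times m (PySem.List.min?_mem h)

-- ===== PRECONDITION & SPEC =====
-- Pre_solution is exactly where the Python A returns: A raises IndexError on [], and loops forever
-- when k < 0, or when k is at least the total positive eating time and no negative (hence
-- never-exhausted) entry exists.
def Pre_solution (times : List Int) (k : Int) : Prop :=
  times ≠ [] ∧ 0 ≤ k ∧ ((∃ t ∈ times, t < 0) ∨ k < (times.filter (fun t => 0 < t)).sum)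
instance (times : List Int) (k : Int) : Decidable (Pre_solution times k) := by
  unfold Pre_solution; infer_instance
def pvWitness_solution : List Int × Int := ([3, 0, 2], 4)

def Spec_solution (times : List Int) (k : Int) (out : Int) : Prop := out = solution_alt times k
instance (times : List Int) (k : Int) (out : Int) : Decidable (Spec_solution times k out) := by
  unfold Spec_solution; infer_instance

-- ===== CLAIM (what is proved, stated in full; the proofs are below) =====
def Claim_equal_solution : Prop := ∀ (times : List Int) (k : Int), Dom_solution times k → Pre_solution times k → Spec_solution times k (solution times k)

-- ===== LEMMAS AND PROOFS =====

theorem pvWrapA (ts : List Int) (n k : Int) (f : Nat) :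
    pvLoopA ts n n k f = pvLoopA ts n 0 k f := by
  cases f with
  | zero => rfl
  | succ f => simp only [pvLoopA]; by_cases h : (0:Int) = n <;> simp [h]

def pvActs (ts : List Int) (e : Nat) : List Int :=
  ((PySem.List.enumerate (ts.drop e) (e : Int)).filter (fun p => p.2 ≠ 0)).map (fun p => p.1)

theorem pvActs_nil (ts : List Int) (e : Nat) (h : ts.length ≤ e) : pvActs ts e = [] := by
  simp [pvActs, List.drop_eq_nil_of_le h, PySem.List.enumerate_nil]

theorem pvActs_step (ts : List Int) (e : Nat) (he : e < ts.length) :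
    pvActs ts e = if ts[e] ≠ 0 then (e:Int) :: pvActs ts (e+1) else pvActs ts (e+1) := by
  unfold pvActs
  rw [List.drop_eq_getElem_cons he, PySem.List.enumerate_cons]
  push_cast
  by_cases h : ts[e] = 0 <;> simp [h]

theorem pvActs_set (ts : List Int) (e : Nat) (v : Int) :
    pvActs (ts.set e v) (e+1) = pvActs ts (e+1) := by
  unfold pvActs
  rw [List.drop_set_of_lt (hnm := by omega)]

theorem pvPartA (d : Nat) : ∀ (ts : List Int) (e : Nat) (k : Int) (f : Nat),
    ts.length = e + d → 0 ≤ k → k < ((pvActs ts e).length : Int) →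
    pvLoopA ts (ts.length : Int) (e : Int) k (f + d) = some ((pvActs ts e).getD k.toNat 0 + 1) := by
  induction d with
  | zero =>
    intro ts e k f hlen hk0 hklt
    rw [pvActs_nil ts e (by omega)] at hklt
    simp at hklt
    omega
  | succ d ih =>
    intro ts e k f hlen hk0 hklt
    have he : e < ts.length := by omega
    have hne : ((e:Int) = (ts.length:Int)) = False := by
      simp only [eq_iff_iff, iff_false]
      exact_mod_cast (by omega : ¬ e = ts.length)
    show pvLoopA ts (ts.length : Int) (e : Int) k ((f + d) + 1) = _
    rw [pvActs_step ts e he] at hklt ⊢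
    simp only [pvLoopA, hne, if_false]
    rw [PySem.List.pyGet?_natCast, List.getElem?_eq_getElem he]
    by_cases ht : ts[e] = 0
    · simp only [ht, ne_eq, not_true_eq_false, if_false] at hklt ⊢
      have := ih ts (e+1) k f (by omega) hk0 hklt
      push_cast at this ⊢
      exact this
    · simp only [ht, ne_eq, not_false_eq_true, if_true] at hklt ⊢
      by_cases hk : k = 0
      · simp only [hk]
        simp
      · simp only [hk, if_false]
        have hk1 : 1 ≤ k := by omega
        have hacts : pvActs (ts.set e (ts[e] - 1)) (e+1) = pvActs ts (e+1) := pvActs_set ts e _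
        have := ih (ts.set e (ts[e] - 1)) (e+1) (k-1) f (by simpa using (by omega : ts.length = (e+1) + d))
          (by omega) (by rw [hacts]; simp only [List.length_cons] at hklt; push_cast at hklt ⊢; omega)
        rw [hacts] at this
        simp only [List.length_set] at this
        rw [PySem.List.pySetD_natCast]
        push_cast at this ⊢
        rw [this]
        have : k.toNat = (k-1).toNat + 1 := by omega
        rw [this, List.getD_cons_succ]

def pvDec (ts : List Int) (e : Nat) : List Int :=
  ts.take e ++ (ts.drop e).map (fun t => if t = 0 then t else t - 1)

theorem pvDec_last (ts : List Int) (e : Nat) (h : ts.length ≤ e) : pvDec ts e = ts := by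
  simp [pvDec, List.drop_eq_nil_of_le h, List.take_of_length_le h]

theorem pvDec_step_zero (ts : List Int) (e : Nat) (he : e < ts.length) (h0 : ts[e] = 0) :
    pvDec ts e = pvDec ts (e+1) := by
  unfold pvDec
  rw [List.drop_eq_getElem_cons he, List.map_cons, h0, List.take_add_one,
    List.getElem?_eq_getElem he, h0]
  simp

theorem pvDec_step_set (ts : List Int) (e : Nat) (he : e < ts.length) (h0 : ts[e] ≠ 0) :
    pvDec (ts.set e (ts[e] - 1)) (e+1) = pvDec ts e := by
  have h1 : (ts.set e (ts[e] - 1)).drop (e+1) = ts.drop (e+1) := List.drop_set_of_lt (hnm := by omega)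
  have h2 : ts.set e (ts[e] - 1) = ts.take e ++ (ts[e] - 1) :: ts.drop (e+1) := by
    rw [List.set_eq_take_append_cons_drop, if_pos he]
  unfold pvDec
  rw [h1, List.drop_eq_getElem_cons he, List.map_cons]
  rw [h2]
  rw [show e + 1 = (ts.take e).length + 1 from by rw [List.length_take_of_le he.le]]
  rw [List.take_append]
  simp [h0]

theorem pvFullA (d : Nat) : ∀ (ts : List Int) (e : Nat) (k : Int) (f : Nat),
    ts.length = e + d → ((pvActs ts e).length : Int) ≤ k →
    pvLoopA ts (ts.length : Int) (e : Int) k (f + d)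
      = pvLoopA (pvDec ts e) (ts.length : Int) (ts.length : Int) (k - (pvActs ts e).length) f := by
  induction d with
  | zero =>
    intro ts e k f hlen hk
    rw [pvActs_nil ts e (by omega), pvDec_last ts e (by omega)]
    have : (e : Int) = (ts.length : Int) := by exact_mod_cast (by omega : e = ts.length)
    rw [this]
    simp
  | succ d ih =>
    intro ts e k f hlen hk
    have he : e < ts.length := by omega
    have hne : ((e:Int) = (ts.length:Int)) = False := by
      simp only [eq_iff_iff, iff_false]
      exact_mod_cast (by omega : ¬ e = ts.length)
    show pvLoopA ts (ts.length : Int) (e : Int) k ((f + d) + 1) = _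
    rw [pvActs_step ts e he] at hk ⊢
    simp only [pvLoopA, hne, if_false]
    rw [PySem.List.pyGet?_natCast, List.getElem?_eq_getElem he]
    by_cases ht : ts[e] = 0
    · simp only [ht, ne_eq, not_true_eq_false, if_false] at hk ⊢
      rw [pvDec_step_zero ts e he ht]
      have := ih ts (e+1) k f (by omega) hk
      push_cast at this ⊢
      exact this
    · simp only [ht, ne_eq, not_false_eq_true, if_true] at hk ⊢
      have hk0 : ¬ k = 0 := by
        simp only [List.length_cons] at hk; push_cast at hk
        have : (0:Int) ≤ (pvActs ts (e+1)).length := by positivity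
        omega
      simp only [hk0, if_false]
      rw [PySem.List.pySetD_natCast]
      have hacts : pvActs (ts.set e (ts[e] - 1)) (e+1) = pvActs ts (e+1) := pvActs_set ts e _
      have := ih (ts.set e (ts[e] - 1)) (e+1) (k-1) f (by simpa using (by omega : ts.length = (e+1) + d))
        (by rw [hacts]; simp only [List.length_cons] at hk; push_cast at hk ⊢; omega)
      rw [hacts, pvDec_step_set ts e he ht] at this
      simp only [List.length_set] at this
      push_cast at this ⊢
      rw [this]
      congr 1
      simp only [List.length_cons]
      push_cast
      ring

def pvSub (m : Nat) (ts : List Int) : List Int := ts.map (fun t => if t = 0 then t else t - (m : Int))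

theorem pvSub_length (m : Nat) (ts : List Int) : (pvSub m ts).length = ts.length := by
  simp [pvSub]

theorem pvOneRound (ts : List Int) (k : Int) (f : Nat)
    (h : ((pvActs ts 0).length : Int) ≤ k) :
    pvLoopA ts (ts.length : Int) 0 k (f + ts.length)
      = pvLoopA (pvSub 1 ts) (ts.length : Int) 0 (k - (pvActs ts 0).length) f := by
  have := pvFullA ts.length ts 0 k f (by omega) (by exact_mod_cast h)
  push_cast at this
  rw [this, pvWrapA]
  congr 1

theorem pvActs_map_eq (g : Int → Int) : ∀ (ts : List Int) (s : Int),
    (∀ t ∈ ts, (g t ≠ 0 ↔ t ≠ 0)) →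
    ((PySem.List.enumerate (ts.map g) s).filter (fun p => p.2 ≠ 0)).map (fun p => p.1)
      = ((PySem.List.enumerate ts s).filter (fun p => p.2 ≠ 0)).map (fun p => p.1) := by
  intro ts
  induction ts with
  | nil => intro s _; simp
  | cons a tl ih =>
    intro s hcond
    have hiff := hcond a List.mem_cons_self
    have ihs := ih (s+1) (fun t ht => hcond t (List.mem_cons_of_mem _ ht))
    rw [List.map_cons, PySem.List.enumerate_cons, PySem.List.enumerate_cons]
    by_cases h : a = 0
    · subst h
      have hg : g 0 = 0 := by tauto
      simp only [List.filter_cons]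
      simp [hg]
      simpa using ihs
    · have hg : g a ≠ 0 := hiff.2 h
      simp only [List.filter_cons]
      simp [hg, h]
      simpa using ihs

theorem pvSub_zero (ts : List Int) : pvSub 0 ts = ts := by
  simp [pvSub]

theorem pvMulti (m : Nat) : ∀ (ts : List Int) (k : Int) (f : Nat),
    (∀ t ∈ ts, 0 < t → (m : Int) ≤ t) → (m : Int) * (pvActs ts 0).length ≤ k →
    pvLoopA ts (ts.length : Int) 0 k (f + m * ts.length)
      = pvLoopA (pvSub m ts) (ts.length : Int) 0 (k - m * (pvActs ts 0).length) f := by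
  induction m with
  | zero =>
    intro ts k f _ _
    rw [pvSub_zero]
    simp
  | succ m ih =>
    intro ts k f hpos hk
    have hc0 : (0:Int) ≤ ((pvActs ts 0).length : Int) := by positivity
    have hc1 : ((pvActs ts 0).length : Int) ≤ k := by
      calc ((pvActs ts 0).length : Int) = 1 * (pvActs ts 0).length := by ring
        _ ≤ (↑(m+1)) * (pvActs ts 0).length := by
              apply mul_le_mul_of_nonneg_right _ hc0; push_cast; omega
        _ ≤ k := hk
    have hfuel : f + (m+1) * ts.length = (f + m * ts.length) + ts.length := by ring
    rw [hfuel, pvOneRound ts k (f + m * ts.length) hc1]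
    -- case m = 0: one round is all
    cases m with
    | zero =>
      push_cast
      norm_num
    | succ m' =>
      set m := m' + 1 with hm
      have hgood : ∀ t ∈ ts, t ≠ 0 → (if t = 0 then t else t - 1) ≠ 0 := by
        intro t ht hnz
        simp only [hnz, if_false]
        rcases lt_trichotomy t 0 with h | h | h
        · omega
        · omega
        · have := hpos t ht h
          have : (2:Int) ≤ t := by push_cast at this; omega
          omega
      have hacts : pvActs (pvSub 1 ts) 0 = pvActs ts 0 := by
        unfold pvActs
        simp only [List.drop_zero]
        exact pvActs_map_eq _ ts 0 (fun t ht => by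
          constructor
          · intro hgt; by_contra hz; subst hz; simp at hgt
          · exact hgood t ht)
      have hpos' : ∀ t ∈ pvSub 1 ts, 0 < t → (m : Int) ≤ t := by
        intro t' ht' hpos'
        rw [pvSub] at ht'
        obtain ⟨t, ht, rfl⟩ := List.mem_map.1 ht'
        by_cases hz : t = 0
        · simp [hz] at hpos'
        · simp only [hz, if_false] at hpos' ⊢
          have : (0:Int) < t := by push_cast at hpos' ⊢; omega
          have := hpos t ht this
          push_cast at this ⊢
          omega
      have hk' : (m : Int) * (pvActs (pvSub 1 ts) 0).length ≤ k - (pvActs ts 0).length := by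
        rw [hacts]
        have : ((m:Int) + 1) * (pvActs ts 0).length ≤ k := by push_cast at hk ⊢; exact_mod_cast hk
        nlinarith
      have := ih (pvSub 1 ts) (k - (pvActs ts 0).length) f hpos' hk'
      rw [pvSub_length] at this
      rw [this, hacts]
      have hcomp : pvSub m (pvSub 1 ts) = pvSub (m+1) ts := by
        unfold pvSub
        rw [List.map_map]
        apply List.map_congr_left
        intro t ht
        simp only [Function.comp]
        by_cases hz : t = 0
        · simp [hz]
        · by_cases h1 : t = 1
          · exfalso
            have := hpos t ht (by omega)
            push_cast at this; omega
          · simp only [hz, if_false]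
            rw [if_neg (by omega)]
            push_cast; ring
      rw [hcomp]
      congr 1
      push_cast; ring

theorem pvBase (ts : List Int) (k : Int) (hk0 : 0 ≤ k) (hcpos : 0 < (pvActs ts 0).length)
    (hq : ∀ t ∈ ts, 0 < t → k / ((pvActs ts 0).length : Int) < t) (f : Nat) :
    pvLoopA ts (ts.length : Int) 0 k (f + k.toNat * ts.length + ts.length)
      = some ((pvActs ts 0).getD (k % ((pvActs ts 0).length : Int)).toNat 0 + 1) := by
  obtain ⟨c, hc⟩ : ∃ c : Int, c = ((pvActs ts 0).length : Int) := ⟨_, rfl⟩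
  rw [← hc] at hq ⊢
  have hcI : (0:Int) < c := by rw [hc]; exact_mod_cast hcpos
  set q := k / c with hqdef
  set r := k % c with hrdef
  have hr0 : 0 ≤ r := Int.emod_nonneg _ (ne_of_gt hcI)
  have hrc : r < c := Int.emod_lt_of_pos _ hcI
  have hq0 : 0 ≤ q := Int.ediv_nonneg hk0 hcI.le
  have hid : c * q + r = k := Int.mul_ediv_add_emod k c
  have hqk : q ≤ k := Int.ediv_le_self _ hk0
  have hmq : (q.toNat : Int) = q := Int.toNat_of_nonneg hq0
  have hqkN : q.toNat ≤ k.toNat := by omega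
  have hkr : k - q * c = r := by linarith [hid, mul_comm c q]
  have hpos : ∀ t ∈ ts, 0 < t → (q.toNat : Int) ≤ t := by
    intro t ht h; rw [hmq]; have := hq t ht h; omega
  have hkq : (q.toNat : Int) * c ≤ k := by rw [hmq]; linarith [hkr]
  have hsub : (k.toNat - q.toNat) * ts.length = k.toNat * ts.length - q.toNat * ts.length :=
    Nat.sub_mul _ _ _
  have h1 : q.toNat * ts.length ≤ k.toNat * ts.length := Nat.mul_le_mul_right _ hqkN
  have hf : f + k.toNat * ts.length + ts.length
      = ((f + (k.toNat - q.toNat) * ts.length) + ts.length) + q.toNat * ts.length := by omega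
  rw [hf, pvMulti q.toNat ts k _ hpos (by rw [← hc]; exact hkq)]
  rw [← hc, hmq, hkr]
  have hacts : pvActs (pvSub q.toNat ts) 0 = pvActs ts 0 := by
    unfold pvActs pvSub
    simp only [List.drop_zero]
    apply pvActs_map_eq
    intro t ht
    by_cases hz : t = 0
    · simp [hz]
    · simp only [hz, if_false]
      rcases lt_trichotomy t 0 with h | h | h
      · constructor <;> intro <;> omega
      · omega
      · have := hq t ht h
        constructor <;> intro <;> omega
  have hpart := pvPartA ts.length (pvSub q.toNat ts) 0 r (f + (k.toNat - q.toNat) * ts.length)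
    (by rw [pvSub_length]; omega) hr0
    (by rw [hacts, ← hc]; exact hrc)
  rw [pvSub_length, hacts] at hpart
  push_cast at hpart ⊢
  exact hpart

theorem pvEnumFilter_length : ∀ (ts : List Int) (s : Int),
    (((PySem.List.enumerate ts s).filter (fun p => p.2 ≠ 0)).map (fun p => p.1)).length
      = (ts.filter (fun t => t ≠ 0)).length := by
  intro ts
  induction ts with
  | nil => intro s; simp
  | cons a tl ih =>
    intro s
    rw [PySem.List.enumerate_cons]
    by_cases h : a = 0
    · simp only [List.filter_cons]
      simp [h]
      simpa using ih (s+1)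
    · simp only [List.filter_cons]
      simp [h]
      simpa using ih (s+1)

theorem pvActs_length (ts : List Int) :
    (pvActs ts 0).length = (ts.filter (fun t => t ≠ 0)).length := by
  unfold pvActs
  simp only [List.drop_zero]
  exact pvEnumFilter_length ts 0

theorem pvActs_ne_nil (ts : List Int) (t : Int) (ht : t ∈ ts) (hnz : t ≠ 0) :
    0 < (pvActs ts 0).length := by
  rw [pvActs_length, ← List.countP_eq_length_filter]
  exact List.countP_pos_iff.2 ⟨t, ht, by simpa using hnz⟩

theorem pvSum_sub (m : Int) (hm : 0 < m) : ∀ (ts : List Int),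
    (∀ t ∈ ts, 0 < t → m ≤ t) →
    ((ts.map (fun t => if t ≠ 0 then t - m else 0)).filter (fun t => 0 < t)).sum
      = (ts.filter (fun t => 0 < t)).sum - m * ((ts.filter (fun t => 0 < t)).length : Int) := by
  intro ts
  induction ts with
  | nil => simp
  | cons a tl ih =>
    intro h
    have ihs := ih (fun t ht => h t (List.mem_cons_of_mem _ ht))
    rw [List.map_cons, List.filter_cons, List.filter_cons]
    by_cases hz : a = 0
    · rw [if_neg (by simp [hz]), if_neg (by simp [hz])]
      exact ihs
    · have hfa : (if a ≠ 0 then a - m else 0) = a - m := by simp [hz]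
      rw [hfa]
      rcases lt_trichotomy a 0 with ha | ha | ha
      · rw [if_neg (by simp; omega), if_neg (by simp; omega)]
        exact ihs
      · exact absurd ha hz
      · have ham := h a List.mem_cons_self ha
        by_cases he : a = m
        · rw [if_neg (by simp; omega), if_pos (by simpa using ha)]
          rw [ihs, List.sum_cons, List.length_cons]
          subst he
          push_cast
          ring
        · have hma : m < a := by omega
          rw [if_pos (by simp; omega), if_pos (by simpa using ha)]
          rw [List.sum_cons, List.sum_cons, ihs, List.length_cons]
          push_cast
          ring

theorem pvSubB (m : Int) (hm : 0 ≤ m) (ts : List Int) :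
    ts.map (fun t => if t ≠ 0 then t - m else 0) = pvSub m.toNat ts := by
  unfold pvSub
  have hfun : ∀ t : Int, (if t ≠ 0 then t - m else 0) = (if t = 0 then t else t - (m.toNat : Int)) := by
    intro t
    rw [Int.toNat_of_nonneg hm]
    by_cases h : t = 0 <;> simp [h]
  simp only [hfun]

theorem pvActs_zero (ts : List Int) :
    pvActs ts 0 = ((PySem.List.enumerate ts).filter (fun p => p.2 ≠ 0)).map (fun p => p.1) := by
  simp [pvActs]

theorem pvRet (ts : List Int) (k : Int) (hk0 : 0 ≤ k) (hcpos : 0 < (pvActs ts 0).length)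
    (hq : ∀ t ∈ ts, 0 < t → k / ((pvActs ts 0).length : Int) < t) (f : Nat) :
    pvLoopA ts (ts.length : Int) 0 k (f + k.toNat * ts.length + ts.length)
      = some (PySem.List.pyGetD (pvActs ts 0) (PySem.Int.mod k ((pvActs ts 0).length : Int)) 0 + 1) := by
  rw [pvBase ts k hk0 hcpos hq f]
  have hcI : (0:Int) < ((pvActs ts 0).length : Int) := by exact_mod_cast hcpos
  have hr0 : 0 ≤ k % ((pvActs ts 0).length : Int) := Int.emod_nonneg _ (ne_of_gt hcI)
  have hrc : k % ((pvActs ts 0).length : Int) < ((pvActs ts 0).length : Int) :=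
    Int.emod_lt_of_pos _ hcI
  rw [PySem.Int.mod_eq_emod_of_pos hcI]
  rw [PySem.List.pyGetD_eq_getElem _ _ hr0 hrc]
  rw [List.getD_eq_getElem _ _ (by omega : (k % ((pvActs ts 0).length : Int)).toNat < (pvActs ts 0).length)]

theorem pvMain : ∀ (p : Nat) (ts : List Int) (k : Int),
    (ts.filter (fun t => 0 < t)).length ≤ p → Pre_solution ts k →
    ∀ f, pvLoopA ts (ts.length : Int) 0 k (f + k.toNat * ts.length + ts.length)
      = some (solution_alt ts k) := by
  intro p
  induction p using Nat.strong_induction_on with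
  | _ p ih =>
    intro ts k hp hpre f
    obtain ⟨hne, hk0, hlast⟩ := hpre
    rw [solution_alt]
    split
    · -- min? pos = some m
      rename_i m hmin
      have hmem := PySem.List.min?_mem hmin
      have hmin_le := fun y hy => PySem.List.min?_isMin hmin y hy
      rw [List.mem_filter] at hmem
      obtain ⟨hmts, hm0⟩ := hmem
      have hm0 : (0:Int) < m := by simpa using hm0
      have hcpos : 0 < (pvActs ts 0).length := pvActs_ne_nil ts m hmts (by omega)
      have hcI : (0:Int) < ((pvActs ts 0).length : Int) := by exact_mod_cast hcpos
      rw [← pvActs_zero]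
      split
      · -- recursive case: k ≥ m * c, jump m.toNat whole rounds at once and recurse
        rename_i hkm
        have hkm' : m * ((pvActs ts 0).length : Int) ≤ k := hkm
        have hmN : (m.toNat : Int) = m := Int.toNat_of_nonneg hm0.le
        have hc1 : (1:Int) ≤ ((pvActs ts 0).length : Int) := by omega
        obtain ⟨P, hP⟩ : ∃ P, P = m * ((pvActs ts 0).length : Int) := ⟨_, rfl⟩
        have hmP : m ≤ P := by
          rw [hP]
          exact le_mul_of_one_le_right hm0.le hc1
        rw [← hP] at hkm'
        have hmkN : m.toNat ≤ k.toNat := by omega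
        have hk'0 : 0 ≤ k - P := by omega
        have hk'N : (k - P).toNat ≤ k.toNat - m.toNat := by omega
        rw [pvSubB m hm0.le ts]
        obtain ⟨x, hx⟩ : ∃ x, x + (k - P).toNat + m.toNat = k.toNat :=
          ⟨k.toNat - m.toNat - (k - P).toNat, by omega⟩
        have hfuel : f + k.toNat * ts.length + ts.length
            = ((f + x * ts.length) + (k - P).toNat * ts.length + ts.length) + m.toNat * ts.length := by
          rw [← hx]
          ring
        have hposM : ∀ t ∈ ts, 0 < t → (m.toNat : Int) ≤ t := by
          intro t ht hpos
          rw [hmN]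
          have : t ∈ ts.filter (fun t => 0 < t) := List.mem_filter.2 ⟨ht, by simpa using hpos⟩
          simpa using hmin_le t this
        rw [hfuel, pvMulti m.toNat ts k _ hposM (by rw [hmN, ← hP]; exact hkm')]
        rw [hmN, ← hP]
        -- apply the induction hypothesis to the reduced list
        have hmemf : m ∈ ts.filter (fun t => 0 < t) := by
          rw [List.mem_filter]
          exact ⟨hmts, by simpa using hm0⟩
        have hlt : ((pvSub m.toNat ts).filter (fun t => 0 < t)).length < p := by
          have h2 := pvPosCount_lt ts m hmemf
          rw [pvSubB m hm0.le ts] at h2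
          omega
        have hlen' : (pvSub m.toNat ts).length = ts.length := pvSub_length _ _
        have hposle : ((ts.filter (fun t => 0 < t)).length : Int) ≤ ((pvActs ts 0).length : Int) := by
          rw [pvActs_length]
          have := List.countP_mono_left (l := ts)
            (p := fun t => decide (0 < t)) (q := fun t => decide (t ≠ 0))
            (fun x _ hx => by simp at hx ⊢; omega)
          simp only [← List.countP_eq_length_filter]
          exact_mod_cast this
        have hpre' : Pre_solution (pvSub m.toNat ts) (k - P) := by
          refine ⟨?_, hk'0, ?_⟩
          · apply List.ne_nil_of_length_pos
            rw [hlen']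
            have : ts.length ≠ 0 := fun h => hne (List.eq_nil_of_length_eq_zero h)
            omega
          · rcases hlast with ⟨t, ht, hlt0⟩ | hsum
            · left
              refine ⟨if t = 0 then t else t - (m.toNat : Int), ?_, ?_⟩
              · exact List.mem_map_of_mem ht
              · rw [if_neg (by omega)]
                omega
            · right
              have hsum2 := pvSum_sub m hm0 ts (fun t ht hp0 => by
                have : t ∈ ts.filter (fun t => 0 < t) := List.mem_filter.2 ⟨ht, by simpa using hp0⟩
                simpa using hmin_le t this)
              rw [pvSubB m hm0.le ts] at hsum2
              rw [hsum2, hP]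
              have hmul : m * ((ts.filter (fun t => 0 < t)).length : Int)
                  ≤ m * ((pvActs ts 0).length : Int) :=
                mul_le_mul_of_nonneg_left hposle hm0.le
              linarith
        have hih := ih _ hlt (pvSub m.toNat ts) (k - P) le_rfl hpre' (f + x * ts.length)
        rw [hlen'] at hih
        exact hih
      · -- base case: k < m * c
        rename_i hkm
        rw [not_le] at hkm
        apply pvRet ts k hk0 hcpos
        intro t ht hpos
        have hmt : m ≤ t := by
          have : t ∈ ts.filter (fun t => 0 < t) := List.mem_filter.2 ⟨ht, by simpa using hpos⟩
          simpa using hmin_le t this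
        have hqm : k / ((pvActs ts 0).length : Int) < m := by
          have h1 : ((pvActs ts 0).length : Int) * (k / ((pvActs ts 0).length : Int)) + k % ((pvActs ts 0).length : Int) = k :=
            Int.mul_ediv_add_emod k _
          have h2 : 0 ≤ k % ((pvActs ts 0).length : Int) := Int.emod_nonneg _ (ne_of_gt hcI)
          have h3 : (k / ((pvActs ts 0).length : Int)) * ((pvActs ts 0).length : Int) < m * ((pvActs ts 0).length : Int) := by
            calc (k / ((pvActs ts 0).length : Int)) * ((pvActs ts 0).length : Int)
                = ((pvActs ts 0).length : Int) * (k / ((pvActs ts 0).length : Int)) := by ring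
              _ ≤ k := by omega
              _ < m * ((pvActs ts 0).length : Int) := hkm
          exact lt_of_mul_lt_mul_right h3 hcI.le
        omega
    · -- min? pos = none : no positive entries
      rename_i hmin
      have hposnil : ts.filter (fun t => 0 < t) = [] := (PySem.List.min?_eq_none_iff _ _).1 hmin
      have hex : ∃ t ∈ ts, t ≠ 0 := by
        rcases hlast with ⟨t, ht, hlt⟩ | hsum
        · exact ⟨t, ht, by omega⟩
        · rw [hposnil] at hsum
          simp at hsum
          omega
      obtain ⟨t0, ht0, ht0nz⟩ := hex
      have hcpos : 0 < (pvActs ts 0).length := pvActs_ne_nil ts t0 ht0 ht0nz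
      rw [← pvActs_zero]
      apply pvRet ts k hk0 hcpos
      intro t ht hpos
      exfalso
      have : t ∈ ts.filter (fun t => 0 < t) := List.mem_filter.2 ⟨ht, by simpa using hpos⟩
      rw [hposnil] at this
      simp at this

-- ===== VERDICT (by name: the statement is the Claim_ definition above) =====
theorem solution_spec : Claim_equal_solution := by
  intro times k _hdom hpre
  unfold Spec_solution solution
  have h := pvMain (times.filter (fun t => 0 < t)).length times k le_rfl hpre 1
  have heq : k.toNat * times.length + times.length + 1 = 1 + k.toNat * times.length + times.length := by omega
  rw [heq, h]
  rfl
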